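-- pv_equiv track=rewrite | github.com/plqj/leetcode_problem_self | algorithm_learning/010_dpDigitTypeMostGivenN.py | dpDigitTypeMostGivenN
-- ===== SOURCE A (Python) =====
-- from functools import cache
--
-- def dpDigitTypeMostGivenN(digits:list[str],n:int)->int:
--     s=str(n)
--
--     @cache
--     def f(i:int,isLimit:bool,isNum:bool):
--         # 递归出口
--         if i == len(s):return int(isNum)
--
--         res=0
--
--         if not isNum:
--             res=f(i+1,False,False) # 上一位不填了，所以这一位任意数字都不会越界，当前还不是数字
--
--         up=s[i] if isLimit else "9"
--
--         for d in digits: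
--             if d > up: break
--             res += f(i+1,isLimit and d == up,True)
--         return res
--
--     return f(0,True,False)
-- ===== SOURCE B (Python) =====
-- def _split(digits, ch):
--     lt = eq = 0
--     for d in digits:
--         if d > ch:
--             break
--         if d == ch:
--             eq += 1
--         else:
--             lt += 1
--     return lt, eq
--
-- def dpDigitTypeMostGivenN(digits, n):
--     s = str(n)
--     L = len(s)
--     lt9, eq9 = _split(digits, "9")
--     E = lt9 + eq9
--     total = 0
--     for j in range(1, L):
--         total += E**j
--     mult = 1
--     for i in range(L):
--         lt, eq = _split(digits, s[i])
--         total += mult * lt * E**(L - 1 - i)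
--         mult *= eq
--     return total + mult
-- ===== Notes on version B (the rewrite author's own statement) =====
-- stated objective: simpler
-- what changed: Replaces the memoized 3-state digit-DP recursion with a closed-form arithmetic pass: a geometric sum D^1+...+D^(L-1) for shorter lengths plus one prefix-product scan over str(n) counting digits below each position.
import Mathlib
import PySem

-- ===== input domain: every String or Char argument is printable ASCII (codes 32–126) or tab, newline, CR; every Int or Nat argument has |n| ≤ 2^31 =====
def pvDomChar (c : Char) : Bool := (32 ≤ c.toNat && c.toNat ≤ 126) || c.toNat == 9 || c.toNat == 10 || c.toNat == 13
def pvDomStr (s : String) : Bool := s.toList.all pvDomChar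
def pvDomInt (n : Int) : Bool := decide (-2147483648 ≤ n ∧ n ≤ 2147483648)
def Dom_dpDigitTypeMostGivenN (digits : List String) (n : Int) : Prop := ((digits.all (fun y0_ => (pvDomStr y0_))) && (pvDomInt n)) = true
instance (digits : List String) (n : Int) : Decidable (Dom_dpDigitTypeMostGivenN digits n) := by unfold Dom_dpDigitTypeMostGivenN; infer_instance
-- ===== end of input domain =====

-- B replaces A's memoized digit-DP recursion by a closed-form single pass: powers of the digit
-- count for the shorter lengths, then one prefix-product scan over the decimal string (objective: simpler).

-- ===== PORT A =====
-- literal transliteration of the inner recursive f(i, isLimit, isNum); the dependent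
-- 'if h :' guard only makes the recursion total (Python reaches i = len(s) exactly)
def pvFA (digits : List String) (s : List Char) (i : Nat) (isLimit : Bool) (isNum : Bool) : Int :=
  if h : s.length ≤ i then (if isNum then 1 else 0)
  else
    let res : Int := if !isNum then pvFA digits s (i+1) false false else 0
    let up : String := if isLimit then String.ofList [s.getD i ' '] else "9"
    (digits.foldl (fun (acc : Int × Bool) d =>
        if acc.2 then acc
        else if up < d then (acc.1, true)
        else (acc.1 + pvFA digits s (i+1) (isLimit && (d == up)) true, false))
      (res, false)).1
termination_by s.length - i
decreasing_by all_goals omega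

def dpDigitTypeMostGivenN (digits : List String) (n : Int) : Int :=
  pvFA digits (PySem.Int.toChars n) 0 true false

-- ===== PORT B =====
-- _split(digits, ch): scan digits, break at the first d > ch, counting d < ch and d == ch
def pvSplit (digits : List String) (ch : String) : Int × Int :=
  match digits with
  | [] => (0, 0)
  | d :: rest =>
    if ch < d then (0, 0)
    else
      let p := pvSplit rest ch
      if d == ch then (p.1, p.2 + 1) else (p.1 + 1, p.2)

def dpDigitTypeMostGivenN_alt (digits : List String) (n : Int) : Int :=
  let s := PySem.Int.toChars n
  let L := s.length
  let p9 := pvSplit digits "9"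
  let E := p9.1 + p9.2
  let total : Int := (PySem.List.pyRange 1 (L : Int) 1).foldl (fun acc j => acc + E ^ j.toNat) 0
  let r := (List.range L).foldl (fun (acc : Int × Int) i =>
      let p := pvSplit digits (String.ofList [s.getD i ' '])
      (acc.1 + acc.2 * p.1 * E ^ (L - 1 - i), acc.2 * p.2)) (total, 1)
  r.1 + r.2

-- ===== PRECONDITION & SPEC =====
def Spec_dpDigitTypeMostGivenN (digits : List String) (n : Int) (out : Int) : Prop := out = dpDigitTypeMostGivenN_alt digits n
instance (digits : List String) (n : Int) (out : Int) : Decidable (Spec_dpDigitTypeMostGivenN digits n out) := by unfold Spec_dpDigitTypeMostGivenN; infer_instance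

-- ===== CLAIM (what is proved, stated in full; the proofs are below) =====
def Claim_equal_dpDigitTypeMostGivenN : Prop := ∀ (digits : List String) (n : Int), Dom_dpDigitTypeMostGivenN digits n → Spec_dpDigitTypeMostGivenN digits n (dpDigitTypeMostGivenN digits n)

-- ===== LEMMAS AND PROOFS =====

-- proof-side abbreviations: E = number of usable digits, S k = count of shorter numbers
-- of length 1..k, G suffix = value of f(i, True, True) on the remaining suffix of s
def pvE (digits : List String) : Int := (pvSplit digits "9").1 + (pvSplit digits "9").2

def pvS (digits : List String) : Nat → Int
  | 0 => 0
  | k+1 => pvS digits k + pvE digits ^ (k+1)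

def pvG (digits : List String) : List Char → Int
  | [] => 1
  | c :: t => (pvSplit digits (String.ofList [c])).1 * pvE digits ^ t.length
              + (pvSplit digits (String.ofList [c])).2 * pvG digits t

lemma pvToChars_ne_nil (n : Int) : PySem.Int.toChars n ≠ [] := by
  unfold PySem.Int.toChars
  split
  · simp
  · have := Nat.length_toDigits_pos (b := 10) (n := n.toNat)
    intro h; rw [h] at this; simp at this

lemma pvFoldDone (l : List String) (up : String) (g : String → Int) (t : Int) :
    l.foldl (fun (acc : Int × Bool) d =>
        if acc.2 then acc
        else if up < d then (acc.1, true)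
        else (acc.1 + g d, false)) (t, true) = (t, true) := by
  induction l with
  | nil => rfl
  | cons d rest ih => simpa using ih

lemma pvLoopEval (l : List String) (up : String) (g : String → Int) (v w : Int)
    (hg : ∀ d, g d = if d == up then w else v) (t : Int) :
    (l.foldl (fun (acc : Int × Bool) d =>
        if acc.2 then acc
        else if up < d then (acc.1, true)
        else (acc.1 + g d, false)) (t, false)).1
      = t + (pvSplit l up).1 * v + (pvSplit l up).2 * w := by
  induction l generalizing t with
  | nil => simp [pvSplit]
  | cons d rest ih =>
    by_cases hlt : up < d
    · simp only [List.foldl_cons]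
      have hstep : (if false = true then ((t:Int), false) else if up < d then (t, true) else (t + g d, false)) = (t, true) := by simp [hlt]
      rw [hstep, pvFoldDone]
      simp [pvSplit, hlt]
    · simp only [List.foldl_cons]
      have hstep : (if false = true then ((t:Int), false) else if up < d then (t, true) else (t + g d, false)) = (t + g d, false) := by simp [hlt]
      rw [hstep, ih (t + g d)]
      by_cases heq : d == up
      · have hde : d = up := by simpa [beq_iff_eq] using heq
        simp [pvSplit, hlt, hg, hde]
        ring
      · have hde : (d == up) = false := by simpa using heq
        simp [pvSplit, hlt, hg d, hde]
        ring

lemma pvPow (digits : List String) (s : List Char) :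
    ∀ k i, i + k = s.length → pvFA digits s i false true = pvE digits ^ k := by
  intro k
  induction k with
  | zero =>
    intro i hi
    rw [pvFA, dif_pos (by omega)]
    simp
  | succ k ih =>
    intro i hi
    rw [pvFA, dif_neg (by omega)]
    simp only [Bool.not_false, Bool.not_true, Bool.false_eq_true, eq_self_iff_true, if_true, if_false, Bool.false_and, Bool.true_and]
    rw [pvLoopEval digits "9" _ (pvE digits ^ k) (pvE digits ^ k)
      (by intro d; simp [ih (i+1) (by omega)])]
    unfold pvE
    ring

lemma pvFF (digits : List String) (s : List Char) :
    ∀ k i, i + k = s.length → pvFA digits s i false false = pvS digits k := by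
  intro k
  induction k with
  | zero =>
    intro i hi
    rw [pvFA, dif_pos (by omega)]
    simp [pvS]
  | succ k ih =>
    intro i hi
    rw [pvFA, dif_neg (by omega)]
    simp only [Bool.not_false, Bool.not_true, Bool.false_eq_true, eq_self_iff_true, if_true, if_false, Bool.false_and, Bool.true_and]
    rw [pvLoopEval digits "9" _ (pvE digits ^ k) (pvE digits ^ k)
      (by intro d; simp [pvPow digits s k (i+1) (by omega)])]
    rw [ih (i+1) (by omega)]
    simp only [pvS]
    unfold pvE
    ring

lemma pvTT (digits : List String) (s : List Char) :
    ∀ k i, i + k = s.length → pvFA digits s i true true = pvG digits (s.drop i) := by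
  intro k
  induction k with
  | zero =>
    intro i hi
    rw [pvFA, dif_pos (by omega)]
    rw [List.drop_of_length_le (by omega)]
    simp [pvG]
  | succ k ih =>
    intro i hi
    have hlt : i < s.length := by omega
    rw [pvFA, dif_neg (by omega)]
    simp only [Bool.not_false, Bool.not_true, Bool.false_eq_true, eq_self_iff_true, if_true, if_false, Bool.false_and, Bool.true_and]
    rw [pvLoopEval digits (String.ofList [s.getD i ' ']) _ (pvE digits ^ k)
        (pvG digits (s.drop (i+1)))
      (by
        intro d
        by_cases hd : d == String.ofList [s.getD i ' ']
        · simp only [hd, eq_self_iff_true, if_true, if_pos rfl]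
          exact ih (i+1) (by omega)
        · have hdf : (d == String.ofList [s.getD i ' ']) = false := by simpa using hd
          simp only [hdf, Bool.false_eq_true, if_false]
          exact pvPow digits s k (i+1) (by omega))]
    rw [List.drop_eq_getElem_cons hlt]
    simp only [pvG]
    rw [List.getD_eq_getElem s ' ' hlt]
    have hdl : (s.drop (i+1)).length = k := by simp; omega
    rw [hdl]
    ring

lemma pvTotal (digits : List String) (m : Nat) :
    (PySem.List.pyRange 1 ((m+1 : Nat) : Int) 1).foldl
        (fun acc j => acc + pvE digits ^ j.toNat) 0 = pvS digits m := by
  induction m with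
  | zero => rw [PySem.List.pyRange_one_eq_nil (by simp)]; rfl
  | succ m ih =>
    rw [show (((m+1+1 : Nat)) : Int) = ((m+1 : Nat) : Int) + 1 by push_cast; ring]
    rw [PySem.List.pyRange_one_succ_right (by omega)]
    rw [List.foldl_append, ih]
    simp only [List.foldl_cons, List.foldl_nil, pvS]
    norm_num

lemma pvBLoop (digits : List String) (s : List Char) :
    ∀ k i (t m : Int), i + k = s.length →
    (((List.range' i k).foldl (fun (acc : Int × Int) j =>
        let p := pvSplit digits (String.ofList [s.getD j ' '])
        (acc.1 + acc.2 * p.1 * pvE digits ^ (s.length - 1 - j), acc.2 * p.2)) (t, m)).1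
      + ((List.range' i k).foldl (fun (acc : Int × Int) j =>
        let p := pvSplit digits (String.ofList [s.getD j ' '])
        (acc.1 + acc.2 * p.1 * pvE digits ^ (s.length - 1 - j), acc.2 * p.2)) (t, m)).2)
      = t + m * pvG digits (s.drop i) := by
  intro k
  induction k with
  | zero =>
    intro i t m hi
    rw [List.drop_of_length_le (by omega)]
    simp [pvG]
  | succ k ih =>
    intro i t m hi
    have hlt : i < s.length := by omega
    rw [List.range'_succ]
    simp only [List.foldl_cons]
    rw [ih (i+1) _ _ (by omega)]
    rw [List.drop_eq_getElem_cons hlt]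
    simp only [pvG]
    rw [List.getD_eq_getElem s ' ' hlt]
    have hdl : (s.drop (i+1)).length = s.length - 1 - i := by simp; omega
    rw [hdl]
    ring

-- ===== VERDICT (by name: the statement is the Claim_ definition above) =====
theorem dpDigitTypeMostGivenN_spec : Claim_equal_dpDigitTypeMostGivenN := by
  intro digits n _
  unfold Spec_dpDigitTypeMostGivenN
  unfold dpDigitTypeMostGivenN dpDigitTypeMostGivenN_alt
  set s := PySem.Int.toChars n with hs
  have hne : s ≠ [] := pvToChars_ne_nil n
  obtain ⟨m, hm⟩ : ∃ m, s.length = m + 1 := by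
    cases hL : s.length with
    | zero => exact absurd (List.eq_nil_of_length_eq_zero hL) hne
    | succ m => exact ⟨m, rfl⟩
  -- A side
  rw [pvFA, dif_neg (by omega)]
  simp only [Bool.not_false, Bool.not_true, Bool.false_eq_true, eq_self_iff_true, if_true,
    if_false, Bool.false_and, Bool.true_and]
  rw [pvLoopEval digits (String.ofList [s.getD 0 ' ']) _ (pvE digits ^ m)
      (pvG digits (s.drop 1))
    (by
      intro d
      by_cases hd : d == String.ofList [s.getD 0 ' ']
      · simp only [hd, eq_self_iff_true, if_true, if_pos rfl]
        exact pvTT digits s m 1 (by omega)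
      · have hdf : (d == String.ofList [s.getD 0 ' ']) = false := by simpa using hd
        simp only [hdf, Bool.false_eq_true, if_false]
        exact pvPow digits s m 1 (by omega))]
  rw [pvFF digits s m 1 (by omega)]
  -- B side
  rw [hm]
  rw [List.range_eq_range']
  rw [show (pvSplit digits "9").1 + (pvSplit digits "9").2 = pvE digits from rfl]
  rw [pvTotal digits m]
  have hB := pvBLoop digits s (m+1) 0 (pvS digits m) 1 (by omega)
  simp only [hm, Nat.add_sub_cancel, List.drop_zero] at hB ⊢
  rw [hB]
  have hcons : s = s[0]'(by omega) :: s.drop 1 := by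
    conv_lhs => rw [← List.drop_zero (l := s)]
    exact List.drop_eq_getElem_cons (by omega)
  conv_rhs => rw [hcons]
  simp only [pvG]
  rw [List.getD_eq_getElem s ' ' (by omega)]
  have hdl : (s.drop 1).length = m := by simp [hm]
  rw [hdl]
  ring
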